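-- pv_equiv track=rewrite | github.com/pypi-data/pypi-mirror-382 | packages/context-cleaner/context_cleaner-0.3.0.tar.gz/context_cleaner-0.3.0/src/context_cleaner/services/service_orchestrator.py | _extract_port_from_command
-- ===== SOURCE A (Python) =====
-- from typing import Dict, List, Optional, Any, Callable, Tuple, Awaitable, Union, Sequence, Set
--
-- def _extract_port_from_command(command: List[str]) -> Optional[int]:
--     """Extract port number from command line arguments."""
--     if not command:
--         return None
--
--     try:
--         # Look for --port parameter
--         for i, arg in enumerate(command):
--             if arg == "--port" and i + 1 < len(command):
--                 return int(command[i + 1])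
--             elif arg.startswith("--port="):
--                 return int(arg.split("=", 1)[1])
--
--         # Look for -p parameter
--         for i, arg in enumerate(command):
--             if arg == "-p" and i + 1 < len(command):
--                 return int(command[i + 1])
--
--         return None
--     except (ValueError, IndexError):
--         return None
-- ===== SOURCE B (Python) =====
-- def _extract_port_from_command(command):
--     """Extract port number: one pass, '--port' wins immediately, first '-p' value deferred."""
--     p_val = None
--     try:
--         for i, arg in enumerate(command):
--             if arg == "--port" and i + 1 < len(command):
--                 return int(command[i + 1])
--             if arg.startswith("--port="):
--                 return int(arg.split("=", 1)[1])
--             if arg == "-p" and i + 1 < len(command) and p_val is None: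
--                 p_val = command[i + 1]
--         if p_val is not None:
--             return int(p_val)
--         return None
--     except (ValueError, IndexError):
--         return None
-- ===== Notes on version B (the rewrite author's own statement) =====
-- stated objective: simpler
-- what changed: Replaces A's two sequential enumerate passes ('--port' pass, then '-p' pass) with a single pass that returns on '--port'/'--port=' immediately and defers the first recorded '-p' value to after the loop.
import Mathlib
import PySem

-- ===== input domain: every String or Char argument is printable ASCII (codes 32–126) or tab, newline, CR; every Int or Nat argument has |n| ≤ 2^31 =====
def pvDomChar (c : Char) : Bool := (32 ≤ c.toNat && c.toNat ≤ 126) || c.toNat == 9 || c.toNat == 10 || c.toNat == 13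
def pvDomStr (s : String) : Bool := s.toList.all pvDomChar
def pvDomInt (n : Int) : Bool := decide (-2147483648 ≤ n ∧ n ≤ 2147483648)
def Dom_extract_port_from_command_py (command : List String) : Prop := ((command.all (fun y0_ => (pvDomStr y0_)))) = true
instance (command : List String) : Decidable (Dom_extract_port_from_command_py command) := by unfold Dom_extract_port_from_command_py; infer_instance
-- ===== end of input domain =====

-- ===== PORT A =====
-- B merges A's two passes into one loop with a deferred '-p' value; return values proved equal.
-- shared line of both Pythons: int(arg.split("=", 1)[1])
def pvPortEqVal (arg : String) : Option Int :=
  ((PySem.Str.splitMax? arg "=" 1).bind (fun ps => PySem.List.pyGet? ps 1)).bind PySem.Int.ofStr?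

-- A's first pass: 'some r' = the function returns r (r = none on ValueError), 'none' = fall through
def pyLoop1 (command : List String) (i : Nat) (rest : List String) : Option (Option Int) :=
  match rest with
  | [] => none
  | arg :: rs =>
    if arg = "--port" ∧ i + 1 < command.length then
      some ((PySem.List.pyGet? command ((i : Int) + 1)).bind PySem.Int.ofStr?)
    else if PySem.Str.startswith arg "--port=" then
      some (pvPortEqVal arg)
    else pyLoop1 command (i + 1) rs

-- A's second pass: first '-p' with a following element
def pyLoop2 (command : List String) (i : Nat) (rest : List String) : Option Int :=
  match rest with
  | [] => none
  | arg :: rs =>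
    if arg = "-p" ∧ i + 1 < command.length then
      (PySem.List.pyGet? command ((i : Int) + 1)).bind PySem.Int.ofStr?
    else pyLoop2 command (i + 1) rs

def extract_port_from_command_py (command : List String) : Option Int :=
  if command = [] then none
  else
    match pyLoop1 command 0 command with
    | some r => r
    | none => pyLoop2 command 0 command

-- ===== PORT B =====
-- single pass; pval = the raw string recorded for the first '-p', parsed only after the loop
def altLoop (command : List String) (i : Nat) (rest : List String) (pval : Option String) : Option Int :=
  match rest with
  | [] => pval.bind PySem.Int.ofStr?
  | arg :: rs =>
    if arg = "--port" ∧ i + 1 < command.length then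
      (PySem.List.pyGet? command ((i : Int) + 1)).bind PySem.Int.ofStr?
    else if PySem.Str.startswith arg "--port=" then
      pvPortEqVal arg
    else if arg = "-p" ∧ i + 1 < command.length ∧ pval = none then
      altLoop command (i + 1) rs (PySem.List.pyGet? command ((i : Int) + 1))
    else altLoop command (i + 1) rs pval

def extract_port_from_command_py_alt (command : List String) : Option Int :=
  altLoop command 0 command none

-- ===== PRECONDITION & SPEC =====
def Spec_extract_port_from_command_py (command : List String) (out : Option Int) : Prop := out = extract_port_from_command_py_alt command
instance (command : List String) (out : Option Int) : Decidable (Spec_extract_port_from_command_py command out) := by unfold Spec_extract_port_from_command_py; infer_instance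

-- ===== CLAIM (what is proved, stated in full; the proofs are below) =====
def Claim_equal_extract_port_from_command_py : Prop := ∀ (command : List String), Dom_extract_port_from_command_py command → Spec_extract_port_from_command_py command (extract_port_from_command_py command)

-- ===== LEMMAS AND PROOFS =====
theorem pyGet?_succ_of_lt (command : List String) (i : Nat) (h : i + 1 < command.length) :
    PySem.List.pyGet? command ((i : Int) + 1) = some command[i + 1] := by
  have : ((i : Int) + 1) = ((i + 1 : Nat) : Int) := by push_cast; ring
  rw [this, PySem.List.pyGet?_natCast, List.getElem?_eq_getElem h]

theorem altLoop_eq (command : List String) :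
    ∀ (rest : List String) (i : Nat) (pval : Option String), command.drop i = rest →
    altLoop command i rest pval =
      match pyLoop1 command i rest with
      | some r => r
      | none =>
        match pval with
        | some s => PySem.Int.ofStr? s
        | none => pyLoop2 command i rest := by
  intro rest
  induction rest with
  | nil =>
    intro i pval _
    cases pval <;> simp [altLoop, pyLoop1, pyLoop2, Option.bind]
  | cons arg rs ih =>
    intro i pval hdrop
    have hdrop' : command.drop (i + 1) = rs := by
      have := congrArg List.tail hdrop
      simpa [List.tail_drop] using this
    show (if arg = "--port" ∧ i + 1 < command.length then
            (PySem.List.pyGet? command ((i : Int) + 1)).bind PySem.Int.ofStr?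
          else if PySem.Str.startswith arg "--port=" then pvPortEqVal arg
          else if arg = "-p" ∧ i + 1 < command.length ∧ pval = none then
            altLoop command (i + 1) rs (PySem.List.pyGet? command ((i : Int) + 1))
          else altLoop command (i + 1) rs pval)
        = match (if arg = "--port" ∧ i + 1 < command.length then
                   some ((PySem.List.pyGet? command ((i : Int) + 1)).bind PySem.Int.ofStr?)
                 else if PySem.Str.startswith arg "--port=" then some (pvPortEqVal arg)
                 else pyLoop1 command (i + 1) rs) with
          | some r => r
          | none =>
            match pval with
            | some s => PySem.Int.ofStr? s
            | none =>
              if arg = "-p" ∧ i + 1 < command.length then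
                (PySem.List.pyGet? command ((i : Int) + 1)).bind PySem.Int.ofStr?
              else pyLoop2 command (i + 1) rs
    by_cases h1 : arg = "--port" ∧ i + 1 < command.length
    · rw [if_pos h1, if_pos h1]
    · rw [if_neg h1, if_neg h1]
      by_cases h2 : PySem.Str.startswith arg "--port=" = true
      · rw [if_pos h2, if_pos h2]
      · rw [if_neg h2, if_neg h2]
        by_cases h3 : arg = "-p" ∧ i + 1 < command.length ∧ pval = none
        · obtain ⟨ha, hlen, hpv⟩ := h3
          subst hpv
          rw [if_pos ⟨ha, hlen, rfl⟩, ih (i + 1) _ hdrop', if_pos ⟨ha, hlen⟩,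
             pyGet?_succ_of_lt command i hlen]
          cases pyLoop1 command (i + 1) rs <;> rfl
        · rw [if_neg h3]
          rw [ih (i + 1) pval hdrop']
          cases pval with
          | some s => rfl
          | none => rw [if_neg (fun hc => h3 ⟨hc.1, hc.2, rfl⟩)]

-- ===== VERDICT (by name: the statement is the Claim_ definition above) =====
theorem extract_port_from_command_py_spec : Claim_equal_extract_port_from_command_py := by
  intro command _
  unfold Spec_extract_port_from_command_py extract_port_from_command_py extract_port_from_command_py_alt
  rw [altLoop_eq command command 0 none (by simp)]
  cases command with
  | nil => simp [pyLoop1, pyLoop2]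
  | cons a cs => simp
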